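-- pv_equiv track=rewrite | github.com/TBU-AILab/ICIP2022-ParEggChallenge | results_merging/nonMaximumSuppression.py | pd_dict_to_results
-- ===== SOURCE A (Python) =====
-- def pd_dict_to_results(pd_dict):
--     results = []
--     for key in pd_dict['image_id'].keys():
--         result = {}
--         for name in pd_dict:
--             result[name] = pd_dict[name][key]
--         results.append(result)
--     return results
-- ===== SOURCE B (Python) =====
-- def pd_dict_to_results(pd_dict):
--     names = list(pd_dict)
--     keys = list(pd_dict['image_id'])
--     columns = [[pd_dict[name][k] for k in keys] for name in names]
--     return [dict(zip(names, row)) for row in zip(*columns)]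
-- ===== Notes on version B (the rewrite author's own statement) =====
-- stated objective: idiomatic
-- what changed: B builds the data column-major (one explicit value list per column name) and reconstructs the rows by transposing with zip(*columns) and dict(zip(names, row)), instead of A's per-row double loop that re-indexes every cell by key.
import Mathlib
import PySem

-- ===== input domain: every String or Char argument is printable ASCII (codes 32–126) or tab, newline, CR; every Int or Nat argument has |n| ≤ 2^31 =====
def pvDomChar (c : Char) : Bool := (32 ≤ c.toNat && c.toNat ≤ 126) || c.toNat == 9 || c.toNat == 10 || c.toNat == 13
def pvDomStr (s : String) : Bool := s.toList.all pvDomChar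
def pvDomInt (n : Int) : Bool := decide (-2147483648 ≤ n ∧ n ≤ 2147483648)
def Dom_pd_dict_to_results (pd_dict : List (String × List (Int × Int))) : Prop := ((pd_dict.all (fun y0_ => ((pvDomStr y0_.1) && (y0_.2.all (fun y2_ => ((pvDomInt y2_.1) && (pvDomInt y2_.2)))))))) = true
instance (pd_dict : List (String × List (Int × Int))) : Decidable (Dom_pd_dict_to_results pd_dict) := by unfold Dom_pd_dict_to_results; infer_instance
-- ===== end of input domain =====

-- B is a more idiomatic decomposition: build explicit column lists and transpose with zip, instead of
-- A's per-row double loop indexing every cell by key. Equal cost; equivalence is about the return value.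

-- the Python argument is a dict of dicts; both ports receive it as the association list and
-- rebuild the dict with Python's dict(pairs) semantics (later duplicates overwrite in place)
def pvDictOf (pd_dict : List (String × List (Int × Int))) : PySem.Dict String (PySem.Dict Int Int) :=
  PySem.Dict.ofList (pd_dict.map (fun p => (p.1, PySem.Dict.ofList p.2)))

-- ===== PORT A =====
def pd_dict_to_results (pd_dict : List (String × List (Int × Int))) : List (List (String × Int)) :=
  let d := pvDictOf pd_dict
  -- for key in pd_dict['image_id'].keys(): … results.append(result)
  ((d.getD "image_id" PySem.Dict.empty).keys).foldl
    (fun results key =>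
      -- for name in pd_dict: result[name] = pd_dict[name][key]
      results ++ [(d.items.foldl (fun result p => result.insert p.1 (p.2.getD key 0)) PySem.Dict.empty).items])
    []

-- ===== PORT B =====
-- Python's zip(*cols): rows until the shortest column runs out (exact port of zip semantics)
def pyZipAux {α : Type} (c : List α) (rest : List (List α)) : List (List α) :=
  match c with
  | [] => []
  | x :: xs =>
    if rest.any (·.isEmpty) then []
    else (x :: rest.map (fun l => l.headD x)) :: pyZipAux xs (rest.map (·.tail))

def pyZipN {α : Type} (cols : List (List α)) : List (List α) :=
  match cols with
  | [] => []
  | c :: rest => pyZipAux c rest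

def pd_dict_to_results_alt (pd_dict : List (String × List (Int × Int))) : List (List (String × Int)) :=
  let d := pvDictOf pd_dict
  let names := d.keys
  let keys := (d.getD "image_id" PySem.Dict.empty).keys
  let columns := names.map (fun n => keys.map (fun k => (d.getD n PySem.Dict.empty).getD k 0))
  (pyZipN columns).map (fun row => (PySem.Dict.ofList (names.zip row)).items)

-- ===== PRECONDITION & SPEC =====
-- Pre_ excludes exactly the inputs on which the Python A raises KeyError: 'image_id' missing from the
-- dict, or some key of the image_id column missing from another column.  (B raises there too.)
def Pre_pd_dict_to_results (pd_dict : List (String × List (Int × Int))) : Prop :=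
  (pvDictOf pd_dict).contains "image_id" = true ∧
  ∀ k ∈ ((pvDictOf pd_dict).getD "image_id" PySem.Dict.empty).keys,
    ∀ p ∈ (pvDictOf pd_dict).items, p.2.contains k = true
instance (pd_dict : List (String × List (Int × Int))) : Decidable (Pre_pd_dict_to_results pd_dict) := by
  unfold Pre_pd_dict_to_results; infer_instance

def pvWitness_pd_dict_to_results : (List (String × List (Int × Int))) :=
  [("image_id", [(1, 10), (2, 20)]), ("score", [(1, 5), (2, 6)])]

def Spec_pd_dict_to_results (pd_dict : List (String × List (Int × Int))) (out : List (List (String × Int))) : Prop := out = pd_dict_to_results_alt pd_dict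
instance (pd_dict : List (String × List (Int × Int))) (out : List (List (String × Int))) : Decidable (Spec_pd_dict_to_results pd_dict out) := by unfold Spec_pd_dict_to_results; infer_instance

-- ===== CLAIM (what is proved, stated in full; the proofs are below) =====
def Claim_equal_pd_dict_to_results : Prop := ∀ (pd_dict : List (String × List (Int × Int))), Dom_pd_dict_to_results pd_dict → Pre_pd_dict_to_results pd_dict → Spec_pd_dict_to_results pd_dict (pd_dict_to_results pd_dict)

-- ===== LEMMAS AND PROOFS =====

lemma foldl_push {α β : Type} (f : α → β) (l : List α) (acc : List β) :
    l.foldl (fun acc x => acc ++ [f x]) acc = acc ++ l.map f := by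
  induction l generalizing acc with
  | nil => simp
  | cons x xs ih => simp [List.foldl_cons, ih]

lemma items_ofList_nodup {κ ν : Type} [BEq κ] [LawfulBEq κ] (ps : List (κ × ν))
    (h : (ps.map Prod.fst).Nodup) : (PySem.Dict.ofList ps).items = ps := by
  have := PySem.Dict.items_foldl_insert_fresh ps (fun p => p.1) (fun p => p.2)
    (PySem.Dict.empty (κ := κ) (ν := ν)) (by intro a _; simp [PySem.Dict.contains_empty]) h
  simpa [PySem.Dict.ofList, PySem.Dict.update] using this

lemma row_items {pd : List (String × List (Int × Int))} (key : Int) :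
    ((pvDictOf pd).items.foldl
      (fun result p => result.insert p.1 (p.2.getD key 0)) PySem.Dict.empty).items
      = (pvDictOf pd).items.map (fun p => (p.1, p.2.getD key 0)) := by
  have hnd : ((pvDictOf pd).items.map Prod.fst).Nodup := by
    have := PySem.Dict.nodup_keys_ofList (pd.map (fun p => (p.1, PySem.Dict.ofList p.2)))
    simpa [pvDictOf, PySem.Dict.keys] using this
  have := PySem.Dict.items_foldl_insert_fresh ((pvDictOf pd).items)
    (fun p => p.1) (fun p => p.2.getD key 0)
    (PySem.Dict.empty (κ := String) (ν := Int))
    (by intro a _; simp [PySem.Dict.contains_empty]) hnd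
  simpa using this

lemma zipAux_grid {α β γ : Type} (g : γ → β → α) (n0 : γ) (ns : List γ) (keys : List β) :
    pyZipAux (keys.map (g n0)) (ns.map (fun n => keys.map (g n)))
      = keys.map (fun k => g n0 k :: ns.map (fun n => g n k)) := by
  induction keys generalizing n0 with
  | nil => simp [pyZipAux]
  | cons k ks ih =>
    simp only [List.map_cons]
    rw [pyZipAux]
    have hany : (ns.map (fun n => g n k :: ks.map (g n))).any (·.isEmpty) = false := by
      simp
    simp only [hany, Bool.false_eq_true, if_false]
    have h1 : (ns.map (fun n => g n k :: ks.map (g n))).map (fun l => l.headD (g n0 k))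
        = ns.map (fun n => g n k) := by simp [List.map_map]
    have h2 : (ns.map (fun n => g n k :: ks.map (g n))).map (·.tail)
        = ns.map (fun n => ks.map (g n)) := by simp [List.map_map]
    rw [h1, h2, ih]

-- ===== VERDICT (by name: the statement is the Claim_ definition above) =====
theorem pd_dict_to_results_spec : Claim_equal_pd_dict_to_results := by
  intro pd _hDom hPre
  unfold Spec_pd_dict_to_results pd_dict_to_results pd_dict_to_results_alt
  simp only []
  set d := pvDictOf pd with hd
  set keys := (d.getD "image_id" PySem.Dict.empty).keys with hkeys
  have hnd : d.keys.Nodup := by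
    exact PySem.Dict.nodup_keys_ofList (pd.map (fun p => (p.1, PySem.Dict.ofList p.2)))
  -- names is nonempty since 'image_id' ∈ keys
  have hmem : "image_id" ∈ d.keys := (PySem.Dict.contains_iff_mem_keys d _).mp hPre.1
  obtain ⟨n0, ns, hn⟩ : ∃ n0 ns, d.keys = n0 :: ns := by
    cases h : d.keys with
    | nil => rw [h] at hmem; simp at hmem
    | cons a l => exact ⟨a, l, rfl⟩
  -- A's value
  rw [foldl_push]
  simp only [List.nil_append]
  -- B's value
  rw [hn, List.map_cons, pyZipN,
    zipAux_grid (fun n k => (d.getD n PySem.Dict.empty).getD k 0) n0 ns keys]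
  rw [List.map_map]
  apply List.map_congr_left
  intro k _
  rw [row_items (pd := pd)]
  have hzip : (n0 :: ns).zip
      ((d.getD n0 PySem.Dict.empty).getD k 0 :: ns.map (fun n => (d.getD n PySem.Dict.empty).getD k 0))
      = (n0 :: ns).map (fun n => (n, (d.getD n PySem.Dict.empty).getD k 0)) := by
    have := List.zip_map' (f := id) (g := fun n => (d.getD n PySem.Dict.empty).getD k 0) (l := n0 :: ns)
    simpa using this
  have hnd2 : (((n0 :: ns).map (fun n => (n, (d.getD n PySem.Dict.empty).getD k 0))).map Prod.fst).Nodup := by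
    have h1 : (n0 :: ns).Nodup := hn ▸ hnd
    simpa [List.map_map, Function.comp_def] using h1
  simp only [Function.comp]
  rw [hzip, items_ofList_nodup _ hnd2, ← hd, ← hn]
  have hk : d.keys = d.items.map Prod.fst := rfl
  rw [hk, List.map_map]
  apply List.map_congr_left
  intro p hp
  have : d.getD p.1 PySem.Dict.empty = p.2 :=
    PySem.Dict.getD_of_mem_items d (by simpa using hp) hnd _
  simp [this]
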